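-- pv_equiv track=rewrite | github.com/ippyk/Advent-of-Code-2024 | day_22/22.1.py | next_secret
-- ===== SOURCE A (Python) =====
-- def next_secret(num, iters):
--
--
--     for i in range(iters):
--         new1 = num * 64
--         new_num = num ^ new1
--         new_num = new_num % 16777216
--
--         new2 = new_num // 32
--         new_num = new_num ^ new2
--         new_num = new_num % 16777216
--
--         new3 = new_num * 2048
--         new_num = new_num ^ new3
--         new_num = new_num % 16777216
--         num = new_num
--
--     return new_num
-- ===== SOURCE B (Python) =====
-- def next_secret(num, iters):
--     # The update step is GF(2)-linear on 24-bit states: compute it once to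
--     # normalize num into [0, 2**24), then apply the (iters-1)-th power of the
--     # linear map by binary exponentiation on its 24 basis images.
--     def step(x):
--         x = (x ^ (x * 64)) % 16777216
--         x = (x ^ (x // 32)) % 16777216
--         x = (x ^ (x * 2048)) % 16777216
--         return x
--
--     def apply(G, x):
--         out = 0
--         for g in G:
--             if x % 2 == 1:
--                 out = out ^ g
--             x = x // 2
--         return out
--
--     v = step(num)
--     base = [step(2 ** j) for j in range(24)]
--     e = iters - 1
--     while e > 0:
--         if e % 2 == 1:
--             v = apply(base, v)
--         base = [apply(base, h) for h in base]
--         e = e // 2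
--     return v
-- ===== Notes on version B (the rewrite author's own statement) =====
-- stated objective: faster
-- what changed: Instead of iterating the PRNG step iters times, B exploits that the step is a GF(2)-linear map on 24-bit states: after one normalizing step it raises the linear map to the (iters-1)-th power by binary exponentiation on its 24 basis images.
-- outside the precondition, e.g. on next_secret(5, 0): A raises NameError, B returns 686415
import Mathlib
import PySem

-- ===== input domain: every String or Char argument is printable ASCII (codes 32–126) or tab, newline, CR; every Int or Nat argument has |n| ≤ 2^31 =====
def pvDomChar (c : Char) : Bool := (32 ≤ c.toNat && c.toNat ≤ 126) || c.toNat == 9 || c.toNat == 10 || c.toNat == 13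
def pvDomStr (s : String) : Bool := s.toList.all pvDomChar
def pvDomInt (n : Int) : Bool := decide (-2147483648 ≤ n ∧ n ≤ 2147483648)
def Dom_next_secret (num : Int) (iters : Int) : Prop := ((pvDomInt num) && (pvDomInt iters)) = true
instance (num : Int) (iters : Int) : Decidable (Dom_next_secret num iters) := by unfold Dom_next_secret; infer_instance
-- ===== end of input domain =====

-- B replaces A's O(iters) loop by binary exponentiation of the GF(2)-linear
-- 24-bit update map (a 24-entry basis table squared log2(iters) times).

-- ===== PORT A =====
-- A runs the xor/shift/mod step iters times and returns the loop-local new_num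
-- (unbound, i.e. NameError, when the loop never runs — excluded by Pre_).
def next_secret (num : Int) (iters : Int) : Int :=
  (((PySem.List.pyRange 0 iters 1).foldl
      (fun (s : Int × Option Int) _ =>
        let new1 := s.1 * 64
        let n1 := PySem.Int.mod (PySem.Int.bxor s.1 new1) 16777216
        let new2 := PySem.Int.floordiv n1 32
        let n2 := PySem.Int.mod (PySem.Int.bxor n1 new2) 16777216
        let new3 := n2 * 2048
        let n3 := PySem.Int.mod (PySem.Int.bxor n2 new3) 16777216
        (n3, some n3))
      (num, none)).2).getD 0

-- ===== PORT B =====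
-- Source B's step(x)
def pvStep (x : Int) : Int :=
  let x1 := PySem.Int.mod (PySem.Int.bxor x (x * 64)) 16777216
  let x2 := PySem.Int.mod (PySem.Int.bxor x1 (PySem.Int.floordiv x1 32)) 16777216
  PySem.Int.mod (PySem.Int.bxor x2 (x2 * 2048)) 16777216

-- Source B's apply(G, x): xor together the table entries selected by x's bits
def pvApply : List Int → Int → Int → Int
  | [], _, out => out
  | g :: gs, x, out =>
      pvApply gs (PySem.Int.floordiv x 2)
        (if PySem.Int.mod x 2 = 1 then PySem.Int.bxor out g else out)

-- Source B's 'while e > 0' square-and-multiply loop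
def pvPowLoop (e : Int) (v : Int) (base : List Int) : Int :=
  if _h : 0 < e then
    let v' := if PySem.Int.mod e 2 = 1 then pvApply base v 0 else v
    pvPowLoop (PySem.Int.floordiv e 2) v' (base.map (fun hrow => pvApply base hrow 0))
  else v
termination_by e.toNat
decreasing_by
  rw [PySem.Int.floordiv_eq_ediv_of_pos (a := e) (b := 2) (by norm_num)]
  omega

def next_secret_alt (num : Int) (iters : Int) : Int :=
  let v := pvStep num
  let base := (PySem.List.pyRange 0 24 1).map (fun j => pvStep ((2 : Int) ^ j.toNat))
  pvPowLoop (iters - 1) v base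

-- ===== PRECONDITION & SPEC =====
-- Pre_ excludes iters ≤ 0: there A's loop body never runs and A raises
-- NameError (new_num unbound); A returns normally exactly when 1 ≤ iters.
def Pre_next_secret (num : Int) (iters : Int) : Prop := 1 ≤ iters
instance (num : Int) (iters : Int) : Decidable (Pre_next_secret num iters) := by unfold Pre_next_secret; infer_instance
def pvWitness_next_secret : Int × Int := (123, 3)

def Spec_next_secret (num : Int) (iters : Int) (out : Int) : Prop := out = next_secret_alt num iters
instance (num : Int) (iters : Int) (out : Int) : Decidable (Spec_next_secret num iters out) := by unfold Spec_next_secret; infer_instance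

-- ===== CLAIM (what is proved, stated in full; the proofs are below) =====
def Claim_equal_next_secret : Prop := ∀ (num : Int) (iters : Int), Dom_next_secret num iters → Pre_next_secret num iters → Spec_next_secret num iters (next_secret num iters)

-- ===== LEMMAS AND PROOFS =====

-- Nat-level shadows of the step and of the table application: every value B
-- manipulates after the first step is a nonnegative 24-bit number.
def sN (x : Nat) : Nat :=
  let x1 := (x ^^^ (x * 64)) % 16777216
  let x2 := (x1 ^^^ (x1 / 32)) % 16777216
  (x2 ^^^ (x2 * 2048)) % 16777216

def applyN : List Nat → Nat → Nat → Nat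
  | [], _, out => out
  | g :: gs, x, out => applyN gs (x / 2) (if x % 2 = 1 then out ^^^ g else out)

theorem sN_lt (x : Nat) : sN x < 16777216 := by
  unfold sN; exact Nat.mod_lt _ (by norm_num)

theorem sN_zero : sN 0 = 0 := by decide

-- xor distributes through *2^k, /2^k and %2^k
theorem xor_mul_pow (x y k : Nat) : (x ^^^ y) * 2 ^ k = x * 2 ^ k ^^^ y * 2 ^ k := by
  simp only [← Nat.shiftLeft_eq]
  apply Nat.eq_of_testBit_eq; intro i
  simp [Nat.testBit_shiftLeft, Nat.testBit_xor]
  by_cases h : k ≤ i <;> simp [h]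

theorem xor_div_pow (x y k : Nat) : (x ^^^ y) / 2 ^ k = x / 2 ^ k ^^^ y / 2 ^ k := by
  simp only [← Nat.shiftRight_eq_div_pow]
  apply Nat.eq_of_testBit_eq; intro i
  simp [Nat.testBit_shiftRight, Nat.testBit_xor]

theorem xor_mod_pow (x y k : Nat) : (x ^^^ y) % 2 ^ k = x % 2 ^ k ^^^ y % 2 ^ k := by
  apply Nat.eq_of_testBit_eq; intro i
  simp [Nat.testBit_mod_two_pow, Nat.testBit_xor]
  by_cases h : i < k <;> simp [h]

-- one substep (x ^^^ f x) % 2^24 is linear when f is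
theorem sub_xor (c : Nat) (f : Nat → Nat) (hf : ∀ a b, f (a ^^^ b) = f a ^^^ f b) (x y : Nat) :
    ((x ^^^ y) ^^^ f (x ^^^ y)) % 2 ^ c = ((x ^^^ f x) % 2 ^ c) ^^^ ((y ^^^ f y) % 2 ^ c) := by
  rw [← xor_mod_pow, hf]
  congr 1
  rw [Nat.xor_assoc, Nat.xor_assoc, ← Nat.xor_assoc y, Nat.xor_comm y (f x), Nat.xor_assoc]

-- the PRNG step is GF(2)-linear
theorem sN_xor (x y : Nat) : sN (x ^^^ y) = sN x ^^^ sN y := by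
  show ((((((x ^^^ y) ^^^ (x ^^^ y) * 64) % 16777216) ^^^ _) % 16777216) ^^^ _) % 16777216 = _
  have h64 : ∀ a b : Nat, (a ^^^ b) * 64 = a * 64 ^^^ b * 64 := fun a b => xor_mul_pow a b 6
  have h2048 : ∀ a b : Nat, (a ^^^ b) * 2048 = a * 2048 ^^^ b * 2048 := fun a b => xor_mul_pow a b 11
  have h32 : ∀ a b : Nat, (a ^^^ b) / 32 = a / 32 ^^^ b / 32 := fun a b => xor_div_pow a b 5
  have e1 := sub_xor 24 (· * 64) h64 x y
  simp only [sN]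
  norm_num at e1 ⊢
  rw [e1]
  have e2 := sub_xor 24 (· / 32) h32 ((x ^^^ x * 64) % 16777216) ((y ^^^ y * 64) % 16777216)
  norm_num at e2; rw [e2]
  have e3 := sub_xor 24 (· * 2048) h2048 (((x ^^^ x * 64) % 16777216 ^^^ (x ^^^ x * 64) % 16777216 / 32) % 16777216) (((y ^^^ y * 64) % 16777216 ^^^ (y ^^^ y * 64) % 16777216 / 32) % 16777216)
  norm_num at e3; rw [e3]

theorem applyN_acc (G : List Nat) (x a : Nat) : applyN G x a = a ^^^ applyN G x 0 := by
  induction G generalizing x a with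
  | nil => simp [applyN]
  | cons g gs ih =>
    simp only [applyN]
    rw [ih (x/2) (if x % 2 = 1 then a ^^^ g else a), ih (x/2) (if x % 2 = 1 then 0 ^^^ g else 0)]
    by_cases h : x % 2 = 1 <;> simp [h, Nat.xor_assoc]

theorem applyN_map_lin (G : List Nat) (f : Nat → Nat) (hf0 : f 0 = 0)
    (hlin : ∀ a b, f (a ^^^ b) = f a ^^^ f b) (x a : Nat) :
    applyN (G.map f) x a = a ^^^ f (applyN G x 0) := by
  induction G generalizing x a with
  | nil => simp [applyN, hf0]
  | cons g gs ih =>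
    simp only [List.map_cons, applyN]
    rw [ih (x/2), applyN_acc gs (x/2) (if x % 2 = 1 then 0 ^^^ g else 0), hlin]
    by_cases h : x % 2 = 1 <;> simp [h, hf0, Nat.xor_assoc]

-- the basis table of sN computes sN
theorem applyN_basis (n k x a : Nat) (hk : k + n = 24) (hx : x < 2 ^ n) :
    applyN ((List.range' k n).map (fun j => sN (2 ^ j))) x a = a ^^^ sN (x * 2 ^ k) := by
  induction n generalizing k x a with
  | zero =>
    interval_cases x
    simp [applyN, sN_zero]
  | succ n ih =>
    rw [List.range'_succ, List.map_cons]
    simp only [applyN]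
    rw [ih (k+1) (x/2) _ (by omega) (by omega)]
    have hsplit : x * 2 ^ k = (x / 2 * 2 ^ (k + 1)) ^^^ (x % 2 * 2 ^ k) := by
      rcases Nat.even_or_odd x with he | ho
      · have h2 : x % 2 = 0 := Nat.even_iff.mp he
        rw [h2, Nat.zero_mul, Nat.xor_zero]
        have hx2 : x = 2 * (x / 2) := by omega
        conv_lhs => rw [hx2]
        ring
      · have h2 : x % 2 = 1 := Nat.odd_iff.mp ho
        rw [h2, one_mul]
        apply Nat.eq_of_testBit_eq; intro i
        simp only [← Nat.shiftLeft_eq, Nat.testBit_xor, Nat.testBit_shiftLeft]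
        rcases lt_trichotomy i k with h1 | h1 | h1
        · simp [Nat.not_le.mpr h1, show ¬ (k + 1 ≤ i) by omega, h1.ne']
        · subst h1
          simp [show ¬ (i + 1 ≤ i) by omega, Nat.testBit_zero, h2]
        · have e1 : Nat.testBit x (i - k) = Nat.testBit (x / 2) (i - (k + 1)) := by
            rw [Nat.testBit_div_two]
            congr 1; omega
          simp [Nat.le_of_lt h1, show k + 1 ≤ i by omega, e1, show k ≠ i by omega]
    by_cases h : x % 2 = 1
    · simp only [h, if_pos]
      rw [hsplit, sN_xor, h, one_mul, Nat.xor_assoc]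
      congr 1
      exact Nat.xor_comm _ _
    · have h0 : x % 2 = 0 := by omega
      simp only [h]
      rw [hsplit, h0, Nat.zero_mul, Nat.xor_zero]
      simp

-- Int → Nat cast bridges for the B-side helpers
theorem pvStep_natCast (x : Nat) : pvStep (x : Int) = ((sN x : Nat) : Int) := by
  simp [pvStep, sN, ← PySem.Int.bxor_natCast]

theorem pvStep_bounds (x : Int) : 0 ≤ pvStep x ∧ pvStep x < 16777216 := by
  unfold pvStep
  exact ⟨PySem.Int.mod_nonneg _ (by norm_num), PySem.Int.mod_lt _ (by norm_num)⟩

theorem pvApply_natCast (G : List Nat) (x a : Nat) :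
    pvApply (G.map Int.ofNat) (x : Int) (a : Int) = ((applyN G x a : Nat) : Int) := by
  induction G generalizing x a with
  | nil => rfl
  | cons g gs ih =>
    have hm : (g :: gs).map Int.ofNat = (g : Int) :: gs.map Int.ofNat := rfl
    rw [hm]
    simp only [pvApply, applyN]
    rw [show PySem.Int.floordiv (x : Int) 2 = ((x / 2 : Nat) : Int) from by
          exact_mod_cast PySem.Int.floordiv_natCast x 2]
    rw [show PySem.Int.mod (x : Int) 2 = ((x % 2 : Nat) : Int) from by
          exact_mod_cast PySem.Int.mod_natCast x 2]
    by_cases h : x % 2 = 1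
    · have hc : ((x % 2 : Nat) : Int) = 1 := by rw [h]; rfl
      rw [if_pos hc, if_pos h, PySem.Int.bxor_natCast, ih]
    · have hc : ¬ (((x % 2 : Nat) : Int) = 1) := fun hh => h (by exact_mod_cast hh)
      rw [if_neg hc, if_neg h, ih]

-- the square-and-multiply loop computes f^[e] whenever the table computes f
theorem pvPowLoop_correct (e : Int) (v : Nat) (G : List Nat) (f : Nat → Nat)
    (hf24 : ∀ x, x < 16777216 → f x < 16777216)
    (hf0 : f 0 = 0) (hlin : ∀ a b, f (a ^^^ b) = f a ^^^ f b)
    (hG : ∀ x, x < 16777216 → applyN G x 0 = f x)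
    (hGb : ∀ g ∈ G, g < 16777216) (hv : v < 16777216) :
    pvPowLoop e (v : Int) (G.map Int.ofNat) = ((f^[e.toNat] v : Nat) : Int) := by
  by_cases hp : 0 < e
  · rw [pvPowLoop]
    simp only [hp, dif_pos]
    have hGmap : (G.map Int.ofNat).map (fun hrow => pvApply (G.map Int.ofNat) hrow 0) =
        (G.map f).map Int.ofNat := by
      rw [List.map_map, List.map_map]
      apply List.map_congr_left
      intro g hg
      show pvApply (G.map Int.ofNat) ((g : Nat) : Int) ((0 : Nat) : Int) = _
      rw [pvApply_natCast, hG g (hGb g hg)]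
      rfl
    have hmod : PySem.Int.mod e 2 = ((e.toNat % 2 : Nat) : Int) := by
      rw [PySem.Int.mod_eq_emod_of_pos (a := e) (b := 2) (by norm_num)]
      omega
    have hdiv : PySem.Int.floordiv e 2 = ((e.toNat / 2 : Nat) : Int) := by
      rw [PySem.Int.floordiv_eq_ediv_of_pos (a := e) (b := 2) (by norm_num)]
      omega
    have hrec := pvPowLoop_correct (PySem.Int.floordiv e 2)
        (if e.toNat % 2 = 1 then f v else v) (G.map f) (f ∘ f)
        (fun x hx => hf24 _ (hf24 _ hx)) (by simp [hf0]) (fun a b => by simp [hlin])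
        (fun x hx => by
          rw [applyN_map_lin G f hf0 hlin, hG x hx, Nat.zero_xor]; rfl)
        (fun g hg => by
          rcases List.mem_map.mp hg with ⟨g', hg', rfl⟩
          exact hf24 _ (hGb g' hg'))
        (by by_cases h : e.toNat % 2 = 1 <;> simp [h, hf24 v hv, hv])
    have hit2 : f^[2] = f ∘ f := by
      funext x
      simp [Function.iterate_succ_apply]
    rw [hGmap]
    have htn : (PySem.Int.floordiv e 2).toNat = e.toNat / 2 := by
      rw [hdiv]; omega
    rw [htn] at hrec
    by_cases h : e.toNat % 2 = 1
    · have hc : PySem.Int.mod e 2 = 1 := by rw [hmod, h]; rfl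
      rw [if_pos hc]
      have hv' : pvApply (G.map Int.ofNat) (v : Int) 0 = ((f v : Nat) : Int) := by
        show pvApply _ _ (((0 : Nat) : Int)) = _
        rw [pvApply_natCast, hG v hv]
      rw [hv', show ((f v : Nat) : Int) = (((if e.toNat % 2 = 1 then f v else v) : Nat) : Int) by rw [if_pos h]]
      rw [hrec]
      congr 1
      have h2 : e.toNat = 2 * (e.toNat / 2) + 1 := by omega
      conv_rhs => rw [h2]
      rw [Function.iterate_succ_apply, Function.iterate_mul, if_pos h, hit2]
    · have hc : ¬ (PySem.Int.mod e 2 = 1) := by rw [hmod]; omega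
      rw [if_neg hc]
      rw [show ((v : Nat) : Int) = (((if e.toNat % 2 = 1 then f v else v) : Nat) : Int) by rw [if_neg h]]
      rw [hrec]
      congr 1
      have h2 : e.toNat = 2 * (e.toNat / 2) := by omega
      conv_rhs => rw [h2]
      rw [Function.iterate_mul, if_neg h, hit2]
  · rw [pvPowLoop]
    simp only [hp]
    have h0 : e.toNat = 0 := by omega
    rw [h0]
    rfl
termination_by e.toNat
decreasing_by
  rw [PySem.Int.floordiv_eq_ediv_of_pos (a := e) (b := 2) (by norm_num)]
  omega

-- A's loop is iteration of the step
theorem foldA (l : List Int) (x : Int) (o : Option Int) (hl : l ≠ []) :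
    l.foldl
      (fun (s : Int × Option Int) _ =>
        let new1 := s.1 * 64
        let n1 := PySem.Int.mod (PySem.Int.bxor s.1 new1) 16777216
        let new2 := PySem.Int.floordiv n1 32
        let n2 := PySem.Int.mod (PySem.Int.bxor n1 new2) 16777216
        let new3 := n2 * 2048
        let n3 := PySem.Int.mod (PySem.Int.bxor n2 new3) 16777216
        (n3, some n3))
      (x, o) = (pvStep^[l.length] x, some (pvStep^[l.length] x)) := by
  induction l generalizing x o with
  | nil => exact absurd rfl hl
  | cons a l ih =>
    rw [List.foldl_cons]
    by_cases h : l = []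
    · subst h
      simp only [List.foldl_nil, List.length_cons, List.length_nil, Nat.zero_add,
        Function.iterate_one]
      rfl
    · rw [ih _ _ h]
      rw [List.length_cons, Function.iterate_succ_apply]
      rfl

theorem next_secret_eq_iter (num iters : Int) (h : 1 ≤ iters) :
    next_secret num iters = pvStep^[iters.toNat] num := by
  unfold next_secret
  have hne : PySem.List.pyRange 0 iters 1 ≠ [] := by
    have := PySem.List.length_pyRange_one (a := 0) (b := iters)
    intro hc
    rw [hc] at this
    simp at this
    omega
  rw [foldA _ _ _ hne, PySem.List.length_pyRange_one]
  simp

-- iterating pvStep on a Nat is iterating sN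
theorem iter_pvStep_natCast (k x : Nat) : pvStep^[k] ((x : Nat) : Int) = ((sN^[k] x : Nat) : Int) := by
  induction k generalizing x with
  | zero => rfl
  | succ k ih => rw [Function.iterate_succ_apply, Function.iterate_succ_apply, pvStep_natCast, ih]

-- B's precomputed table is the cast of sN's basis table
theorem base_eq :
    (PySem.List.pyRange 0 24 1).map (fun j => pvStep ((2 : Int) ^ j.toNat)) =
      ((List.range' 0 24).map (fun j => sN (2 ^ j))).map Int.ofNat := by
  rfl

-- ===== VERDICT (by name: the statement is the Claim_ definition above) =====
theorem next_secret_spec : Claim_equal_next_secret := by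
  intro num iters _hdom hpre
  unfold Spec_next_secret
  have hpre' : (1 : Int) ≤ iters := hpre
  have hn1 : 1 ≤ iters.toNat := by omega
  obtain ⟨hw0, hwlt⟩ := pvStep_bounds num
  have hwc : pvStep num = ((pvStep num).toNat : Int) := by omega
  have hwn : (pvStep num).toNat < 16777216 := by omega
  -- A's value
  rw [next_secret_eq_iter num iters hpre']
  have hsplitA : pvStep^[iters.toNat] num = pvStep^[iters.toNat - 1] (pvStep num) := by
    conv_lhs => rw [show iters.toNat = (iters.toNat - 1) + 1 by omega]
    rw [Function.iterate_succ_apply]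
  rw [hsplitA, hwc, iter_pvStep_natCast]
  -- B's value
  show _ = pvPowLoop (iters - 1) (pvStep num)
      ((PySem.List.pyRange 0 24 1).map (fun j => pvStep ((2 : Int) ^ j.toNat)))
  rw [base_eq, hwc]
  rw [pvPowLoop_correct (iters - 1) (pvStep num).toNat _ sN
        (fun x _ => sN_lt x) sN_zero sN_xor
        (fun x hx => by
          have := applyN_basis 24 0 x 0 (by omega) (by norm_num at hx ⊢; omega)
          simpa using this)
        (fun g hg => by
          rcases List.mem_map.mp hg with ⟨j, _, rfl⟩
          exact sN_lt _)
        hwn]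
  congr 2
  omega
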